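-- pv_equiv track=rewrite | github.com/jess123000/algorithm-and-data-structures-1-python | Lab5/base2.py | base2AsInt
-- ===== SOURCE A (Python) =====
-- def base2AsInt(n: int) -> int:
--     multiplier = None
--     # if the number is negative, change it to a positive number
--     if n / -1 == abs(n):
--         multiplier = -1
--         n = abs(n)
--     # if we aren't to the last division
--     if n // 2 != 0:
--         # divide by two
--         nextNum = n // 2
--         #find the remainder
--         remainder = n % 2
--         # recursive call
--         answer = base2AsInt(nextNum)
--         #multiply by ten to get to the next placeholder
--         answer *= 10
--         #if the remainder is 1
--         if remainder == 1:
--             #add on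
--             answer += 1
--         #if the original answer was negative, negate the answer
--         if multiplier == -1:
--             answer *= multiplier
--             return answer
--         #else return the string
--         else:
--             return answer
--     else:
--         #else the start of our answer is the remainder which is the number the function was passed
--         return n
-- ===== SOURCE B (Python) =====
-- def base2AsInt(n: int) -> int:
--     # iterative: accumulate binary digits of abs(n) low-to-high with a decimal place value
--     m = abs(n)
--     answer = 0
--     place = 1
--     while m >= 2:
--         answer += (m % 2) * place
--         place *= 10
--         m //= 2
--     answer += m * place
--     return -answer if n < 0 else answer
-- ===== Notes on version B (the rewrite author's own statement) =====
-- stated objective: alternative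
-- what changed: Replaces the top-down recursion (recursive call, then multiply the returned prefix by 10 and append the bit) by a bottom-up iterative loop over abs(n) that accumulates bits low-to-high with a running decimal place value, negating the result for any negative input.
-- intended difference: On n = -1 A returns 1 (its negation happens only inside the recursive branch, which -1 never reaches), while B returns -1, the correct decimal rendering of binary -1. — e.g. on base2AsInt(-1): A returns 1, B returns -1
import Mathlib
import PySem

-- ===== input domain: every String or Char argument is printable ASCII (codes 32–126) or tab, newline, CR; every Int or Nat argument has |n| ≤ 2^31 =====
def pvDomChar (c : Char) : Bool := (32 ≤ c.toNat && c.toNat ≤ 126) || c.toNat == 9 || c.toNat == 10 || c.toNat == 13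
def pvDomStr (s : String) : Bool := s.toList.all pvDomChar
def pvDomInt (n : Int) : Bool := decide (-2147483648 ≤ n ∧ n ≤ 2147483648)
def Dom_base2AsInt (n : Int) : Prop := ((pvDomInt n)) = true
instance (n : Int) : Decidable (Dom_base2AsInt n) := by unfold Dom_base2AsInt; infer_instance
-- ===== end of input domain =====

-- B replaces A's top-down recursion by a bottom-up iterative loop with a running decimal
-- place value (alternative decomposition; same asymptotic cost); B negates for every
-- negative input, so it differs from A exactly at n = -1 (see D_ below).


-- termination helper for both ports
theorem fdiv2_natAbs_lt (x : Int) (hx : 0 ≤ x) (h : PySem.Int.floordiv x 2 ≠ 0) :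
    (PySem.Int.floordiv x 2).natAbs < x.natAbs := by
  have e : PySem.Int.floordiv x 2 = x / 2 := PySem.Int.floordiv_eq_ediv_of_pos (by omega)
  rw [e] at h ⊢; omega

-- ===== PORT A =====
-- Python's sign test `n / -1 == abs(n)` uses float division; on |n| ≤ 2^31 it is exact and
-- equals the integer test `-n = |n|`, which is how it is ported.
def base2AsInt (n : Int) : Int :=
  let multiplier : Option Int := if -n = |n| then some (-1) else none
  let n1 : Int := if -n = |n| then |n| else n
  if h : PySem.Int.floordiv n1 2 ≠ 0 then
    let nextNum := PySem.Int.floordiv n1 2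
    let remainder := PySem.Int.mod n1 2
    let answer := base2AsInt nextNum
    let answer := answer * 10
    let answer := if remainder = 1 then answer + 1 else answer
    if multiplier = some (-1) then answer * (-1) else answer
  else n1
termination_by n.natAbs
decreasing_by
  · have h' : PySem.Int.floordiv (if -n = |n| then |n| else n) 2 ≠ 0 := h
    by_cases hc : -n = |n|
    · rw [if_pos hc] at h'
      rw [dif_pos hc]
      have := fdiv2_natAbs_lt |n| (abs_nonneg n) h'
      rwa [Int.natAbs_abs] at this
    · rw [if_neg hc] at h'
      rw [dif_neg hc]
      refine fdiv2_natAbs_lt n ?_ h'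
      by_cases h0 : 0 ≤ n
      · exact h0
      · exact absurd (abs_of_neg (by omega)).symm hc

-- ===== PORT B =====
def base2AsIntLoop (m answer place : Int) : Int :=
  if m ≥ 2 then
    base2AsIntLoop (PySem.Int.floordiv m 2) (answer + PySem.Int.mod m 2 * place) (place * 10)
  else answer + m * place
termination_by m.natAbs
decreasing_by
  have e : PySem.Int.floordiv m 2 = m / 2 := PySem.Int.floordiv_eq_ediv_of_pos (by omega)
  rw [e]; omega

def base2AsInt_alt (n : Int) : Int :=
  let answer := base2AsIntLoop |n| 0 1
  if n < 0 then -answer else answer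

-- ===== PRECONDITION & SPEC =====
-- On n = -1 A returns 1 (its negation happens only inside the recursive branch, which
-- -1 never reaches), while B returns -1, the correct decimal rendering of binary -1.
def D_base2AsInt (n : Int) : Prop := n = -1
instance (n : Int) : Decidable (D_base2AsInt n) := by unfold D_base2AsInt; infer_instance
def Spec_base2AsInt (n : Int) (out : Int) : Prop := ¬ D_base2AsInt n → out = base2AsInt_alt n
instance (n : Int) (out : Int) : Decidable (Spec_base2AsInt n out) := by unfold Spec_base2AsInt; infer_instance
def pvDiffWitness_base2AsInt : Int := -1
def pvDiffWitnessOut_base2AsInt : Int × Int := (1, -1)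

-- ===== CLAIM (what is proved, stated in full; the proofs are below) =====
def Claim_unchanged_base2AsInt : Prop := ∀ (n : Int), Dom_base2AsInt n → Spec_base2AsInt n (base2AsInt n)
def Claim_changed_base2AsInt : Prop := Dom_base2AsInt (pvDiffWitness_base2AsInt) ∧ D_base2AsInt (pvDiffWitness_base2AsInt) ∧ base2AsInt (pvDiffWitness_base2AsInt) = pvDiffWitnessOut_base2AsInt.1 ∧ base2AsInt_alt (pvDiffWitness_base2AsInt) = pvDiffWitnessOut_base2AsInt.2 ∧ pvDiffWitnessOut_base2AsInt.1 ≠ pvDiffWitnessOut_base2AsInt.2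
def Claim_exact_base2AsInt : Prop := ∀ (n : Int), Dom_base2AsInt n → D_base2AsInt n → base2AsInt n ≠ base2AsInt_alt n

-- ===== LEMMAS AND PROOFS =====

theorem floordiv_two_nonneg (m : Int) (_hm : 0 ≤ m) :
    PySem.Int.floordiv m 2 = m / 2 := PySem.Int.floordiv_eq_ediv_of_pos (by omega)

theorem mod_two_nonneg (m : Int) :
    PySem.Int.mod m 2 = m % 2 := PySem.Int.mod_eq_emod_of_pos (by omega)

-- on a nonnegative argument, A returns the plain binary-digits value
theorem baseA_nonneg (m : Int) (hm : 0 ≤ m) :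
    base2AsInt m = if m ≥ 2 then base2AsInt (m / 2) * 10 + m % 2 else m := by
  rw [base2AsInt.eq_def]
  by_cases h2 : m ≥ 2
  · have habs : ¬ (-m = |m|) := by rw [abs_of_nonneg hm]; omega
    simp only [if_neg habs]
    have hd : PySem.Int.floordiv m 2 ≠ 0 := by
      rw [floordiv_two_nonneg m hm]; omega
    simp only [hd, ne_eq, not_false_eq_true, dite_true, reduceCtorEq, if_false, if_pos h2]
    rw [floordiv_two_nonneg m hm, mod_two_nonneg m]
    have : m % 2 = 0 ∨ m % 2 = 1 := by omega
    rcases this with h | h <;> simp [h]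
  · have hd : PySem.Int.floordiv (if -m = |m| then |m| else m) 2 = 0 := by
      have : (if -m = |m| then |m| else m) = m := by
        split <;> simp [abs_of_nonneg hm]
      rw [this, floordiv_two_nonneg m hm]; omega
    simp only [hd, ne_eq, not_true_eq_false, dite_false, if_neg h2]
    split <;> simp [abs_of_nonneg hm]

theorem loop_eq (k : Nat) (m answer place : Int) (hm : 0 ≤ m) (hk : m.natAbs ≤ k) :
    base2AsIntLoop m answer place = answer + place * base2AsInt m := by
  induction k generalizing m answer place with
  | zero =>
    have hm0 : m = 0 := by omega
    subst hm0
    rw [base2AsIntLoop.eq_def, baseA_nonneg 0 le_rfl]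
    norm_num
  | succ k ih =>
    rw [base2AsIntLoop.eq_def, baseA_nonneg m hm]
    by_cases h2 : m ≥ 2
    · rw [if_pos h2, if_pos h2, floordiv_two_nonneg m hm, mod_two_nonneg m,
        ih (m / 2) _ _ (by omega) (by omega)]
      ring
    · rw [if_neg h2, if_neg h2]
      ring

theorem alt_nonneg (m : Int) (hm : 0 ≤ m) : base2AsIntLoop m 0 1 = base2AsInt m := by
  rw [loop_eq m.natAbs m 0 1 hm le_rfl]; ring

-- ===== VERDICT (by name: the statement is the Claim_ definition above) =====
theorem base2AsInt_spec : Claim_unchanged_base2AsInt := by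
  intro n _ hD
  unfold base2AsInt_alt
  by_cases hn : 0 ≤ n
  · rw [abs_of_nonneg hn, alt_nonneg n hn, if_neg (by omega)]
  · have h1 : n ≠ -1 := hD
    have h2 : n ≤ -2 := by omega
    have hneg : n < 0 := by omega
    have hpos : (0:Int) ≤ -n := by omega
    rw [abs_of_neg hneg, alt_nonneg (-n) hpos, if_pos hneg]
    rw [base2AsInt.eq_def]
    have hd : PySem.Int.floordiv (-n) 2 ≠ 0 := by
      rw [floordiv_two_nonneg (-n) hpos]; omega
    simp only [abs_of_neg hneg, if_true, ne_eq, hd, not_false_eq_true, dite_true]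
    rw [baseA_nonneg (-n) hpos, if_pos (by omega : -n ≥ 2),
      floordiv_two_nonneg (-n) hpos, mod_two_nonneg (-n)]
    have : (-n) % 2 = 0 ∨ (-n) % 2 = 1 := by omega
    rcases this with h | h <;> simp [h]

theorem A_at_neg1 : base2AsInt (-1) = 1 := by
  rw [base2AsInt.eq_def]; norm_num

theorem alt_at_neg1 : base2AsInt_alt (-1) = -1 := by
  unfold base2AsInt_alt
  rw [show |(-1:Int)| = 1 from rfl, alt_nonneg 1 (by omega), baseA_nonneg 1 (by omega)]
  norm_num

theorem base2AsInt_changed : Claim_changed_base2AsInt := by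
  unfold Claim_changed_base2AsInt
  refine ⟨by decide, by decide, ?_, ?_, by decide⟩
  · exact A_at_neg1
  · exact alt_at_neg1

theorem base2AsInt_tight : Claim_exact_base2AsInt := by
  intro n _ hD
  subst hD
  rw [A_at_neg1, alt_at_neg1]
  decide
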